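-- pv_equiv track=rewrite | github.com/lkmalins/maize-by-michelangelo | CalcScores/NestedKmerDict.py | RC
-- ===== SOURCE A (Python) =====
-- def RC(seq):
--     rc = ""
--     # syntax [::-1] reverses string
--     for letter in seq[::-1]:
--         if letter == 'A':
--             rc += 'T'
--         elif letter == 'C':
--             rc += 'G'
--         elif letter == 'G':
--             rc += 'C'
--         elif letter == 'T':
--             rc += 'A'
--         else:
--             raise ValueError("Function RC only accepts A, C, G, and T")
--     return rc
-- ===== SOURCE B (Python) =====
-- def RC(seq):
--     if not set(seq) <= set('ACGT'):
--         raise ValueError("Function RC only accepts A, C, G, and T")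
--     return seq.translate(str.maketrans('ACGT', 'TGCA'))[::-1]
-- ===== Notes on version B (the rewrite author's own statement) =====
-- stated objective: idiomatic
-- what changed: Replaces the per-character reverse loop with an if/elif ladder and string accumulation by a single validation pass plus str.translate with a precomputed table and a reversing slice.
import Mathlib
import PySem

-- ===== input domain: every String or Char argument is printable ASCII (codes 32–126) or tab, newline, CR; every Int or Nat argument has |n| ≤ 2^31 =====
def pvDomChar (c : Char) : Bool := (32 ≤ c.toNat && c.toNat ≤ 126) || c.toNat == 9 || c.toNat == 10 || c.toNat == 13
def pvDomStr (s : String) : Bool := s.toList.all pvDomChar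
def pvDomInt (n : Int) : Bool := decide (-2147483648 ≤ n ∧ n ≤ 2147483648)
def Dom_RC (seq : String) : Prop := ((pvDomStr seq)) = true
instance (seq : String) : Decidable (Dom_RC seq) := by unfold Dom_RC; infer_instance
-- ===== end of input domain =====

-- B replaces A's reverse loop with an if/elif ladder by validation + a translation table + a reversing slice;
-- equivalence is claimed on Pre_RC (A raises ValueError on any non-ACGT character, and so does B).

-- ===== PORT A =====
-- the loop 'for letter in seq[::-1]: rc += <complement> / raise' ; 'none' marks the ValueError path
def RCloop : List Char → List Char → Option (List Char)
  | [], rc => some rc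
  | letter :: rest, rc =>
    if letter = 'A' then RCloop rest (rc ++ ['T'])
    else if letter = 'C' then RCloop rest (rc ++ ['G'])
    else if letter = 'G' then RCloop rest (rc ++ ['C'])
    else if letter = 'T' then RCloop rest (rc ++ ['A'])
    else none

-- seq[::-1] is seq.toList.reverse (PySem.Str.slice?_none_none_neg_one); outside Pre_RC A raises, value unclaimed
def RC (seq : String) : String :=
  String.ofList ((RCloop seq.toList.reverse []).getD [])

-- ===== PORT B =====
-- str.maketrans('ACGT','TGCA') applied to one character
def RCtable (c : Char) : Char :=
  if c = 'A' then 'T' else if c = 'C' then 'G' else if c = 'G' then 'C' else if c = 'T' then 'A' else c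

-- validate (set(seq) <= set('ACGT')), then translate and reverse; outside Pre_RC B raises, value unclaimed
def RC_alt (seq : String) : String :=
  if seq.toList.all (fun c => c ∈ ['A', 'C', 'G', 'T']) then
    String.ofList ((seq.toList.map RCtable).reverse)
  else String.ofList []

-- ===== PRECONDITION & SPEC =====
-- Pre_RC: exactly the inputs on which A returns (A raises ValueError on any character outside ACGT)
def Pre_RC (seq : String) : Prop :=
  seq.toList.all (fun c => c ∈ ['A', 'C', 'G', 'T']) = true
instance (seq : String) : Decidable (Pre_RC seq) := by unfold Pre_RC; infer_instance

def pvWitness_RC : String := "GATTACA"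

def Spec_RC (seq : String) (out : String) : Prop := out = RC_alt seq
instance (seq : String) (out : String) : Decidable (Spec_RC seq out) := by unfold Spec_RC; infer_instance

-- ===== CLAIM (what is proved, stated in full; the proofs are below) =====
def Claim_equal_RC : Prop := ∀ (seq : String), Dom_RC seq → Pre_RC seq → Spec_RC seq (RC seq)

-- ===== LEMMAS AND PROOFS =====
lemma RCloop_valid (l : List Char) (h : l.all (fun c => c ∈ ['A', 'C', 'G', 'T']) = true) :
    ∀ rc : List Char, RCloop l rc = some (rc ++ l.map RCtable) := by
  induction l with
  | nil => intro rc; simp [RCloop]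
  | cons c rest ih =>
    intro rc
    simp only [List.all_cons, Bool.and_eq_true] at h
    obtain ⟨hc, hrest⟩ := h
    have hc' : c = 'A' ∨ c = 'C' ∨ c = 'G' ∨ c = 'T' := by simpa using hc
    rcases hc' with h | h | h | h <;> subst h <;>
      simp [RCloop, RCtable, ih hrest]

-- ===== VERDICT (by name: the statement is the Claim_ definition above) =====
theorem RC_spec : Claim_equal_RC := by
  intro seq _ hpre
  unfold Spec_RC RC RC_alt
  have hpre' : seq.toList.all (fun c => c ∈ ['A', 'C', 'G', 'T']) = true := hpre
  have hrev : (seq.toList.reverse).all (fun c => c ∈ ['A', 'C', 'G', 'T']) = true := by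
    simpa using hpre'
  rw [RCloop_valid _ hrev [], if_pos hpre']
  simp [List.map_reverse]
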